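-- pv_equiv track=rewrite | github.com/fenton-xue/cc-skills-dev | merge-cells/scripts/split_cells.py | split_by_hash
-- ===== SOURCE A (Python) =====
-- def split_by_hash(content):
--     """
--     按#拆分内容，每个#及后续内容（直到下一个#之前或到末尾）拆分成一个片段
--
--     例如: "#步骤1#步骤2#步骤3" -> ["#步骤1", "#步骤2", "#步骤3"]
--
--     Args:
--         content: 要拆分的内容
--
--     Returns:
--         拆分后的列表，每个元素包含#号
--     """
--     if content is None:
--         return []
--
--     content_str = str(content).strip()
--     if not content_str:
--         return []
--
--     # 找到所有#的位置
--     parts = []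
--     start_idx = 0
--
--     while True:
--         hash_idx = content_str.find('#', start_idx)
--         if hash_idx == -1:
--             break
--
--         # 找到下一个#的位置，或者到末尾
--         next_hash_idx = content_str.find('#', hash_idx + 1)
--         if next_hash_idx == -1:
--             # 到末尾，包含当前#到字符串末尾
--             parts.append(content_str[hash_idx:])
--             break
--         else:
--             # 到下一个#之前，包含当前#到下一个#之前
--             parts.append(content_str[hash_idx:next_hash_idx])
--             start_idx = next_hash_idx
--
--     return parts
-- ===== SOURCE B (Python) =====
-- def split_by_hash(content):
--     # Same guards as the spec; then one str.split instead of a find() loop: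
--     # split on every '#' at once, drop the text before the first '#', and
--     # re-attach the '#' prefix to each remaining piece.
--     if content is None:
--         return []
--     content_str = str(content).strip()
--     if not content_str:
--         return []
--     parts = content_str.split('#')
--     return ['#' + p for p in parts[1:]]
-- ===== Notes on version B (the rewrite author's own statement) =====
-- stated objective: simpler
-- what changed: Replaced the index-walking while-loop with repeated str.find and slicing by a single str.split('#'), dropping the pre-first-'#' prefix and re-attaching '#' to each remaining piece.
import Mathlib
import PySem

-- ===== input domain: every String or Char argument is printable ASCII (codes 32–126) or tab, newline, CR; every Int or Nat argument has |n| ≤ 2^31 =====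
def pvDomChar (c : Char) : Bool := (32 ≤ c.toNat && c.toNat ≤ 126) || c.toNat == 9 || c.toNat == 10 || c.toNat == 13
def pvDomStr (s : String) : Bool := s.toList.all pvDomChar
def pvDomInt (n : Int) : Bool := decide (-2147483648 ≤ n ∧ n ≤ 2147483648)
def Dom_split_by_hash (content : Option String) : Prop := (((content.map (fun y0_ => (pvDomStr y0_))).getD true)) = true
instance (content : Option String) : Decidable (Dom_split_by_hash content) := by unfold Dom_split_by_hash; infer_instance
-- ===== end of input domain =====

-- B replaces A's find()-walking while-loop by a single split on '#' plus prefix re-attachment (simpler decomposition, same cost).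

-- ===== PORT A =====

-- the while-loop of A: start_idx is `start`, parts is `acc`; `fuel` is a plain
-- totality guard (the caller passes s.length + 1, and start grows on every iteration)
def pvLoopA (s : List Char) (fuel : Nat) (start : Nat) (acc : List String) : List String :=
  match fuel with
  | 0 => acc
  | fuel + 1 =>
    if PySem.Chars.findFrom s ['#'] (start : Int) = -1 then acc
    else if PySem.Chars.findFrom s ['#'] (PySem.Chars.findFrom s ['#'] (start : Int) + 1) = -1 then
      acc ++ [String.ofList (PySem.Chars.slice s (some (PySem.Chars.findFrom s ['#'] (start : Int))) none)]
    else
      pvLoopA s fuel (PySem.Chars.findFrom s ['#'] (PySem.Chars.findFrom s ['#'] (start : Int) + 1)).toNat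
        (acc ++ [String.ofList (PySem.Chars.slice s (some (PySem.Chars.findFrom s ['#'] (start : Int)))
          (some (PySem.Chars.findFrom s ['#'] (PySem.Chars.findFrom s ['#'] (start : Int) + 1))))])

def split_by_hash (content : Option String) : List String :=
  match content with
  | none => []
  | some c =>
    let cs := PySem.Chars.strip c.toList
    if cs = [] then []
    else pvLoopA cs (cs.length + 1) 0 []

-- ===== PORT B =====
def split_by_hash_alt (content : Option String) : List String :=
  match content with
  | none => []
  | some c =>
    let cs := PySem.Chars.strip c.toList
    if cs = [] then []
    else
      let parts := PySem.Chars.splitOn cs ['#']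
      (parts.drop 1).map (fun p => String.ofList ('#' :: p))

-- ===== PRECONDITION & SPEC =====
def Spec_split_by_hash (content : Option String) (out : List String) : Prop := out = split_by_hash_alt content
instance (content : Option String) (out : List String) : Decidable (Spec_split_by_hash content out) := by unfold Spec_split_by_hash; infer_instance

-- ===== CLAIM (what is proved, stated in full; the proofs are below) =====
def Claim_equal_split_by_hash : Prop := ∀ (content : Option String), Dom_split_by_hash content → Spec_split_by_hash content (split_by_hash content)

-- ===== LEMMAS AND PROOFS =====

-- facts about a successful find('#', k)
theorem pvFindFacts (s : List Char) (k : Nat) (hk : k ≤ s.length)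
    (h : PySem.Chars.findFrom s ['#'] (k : Int) ≠ -1) :
    k ≤ (PySem.Chars.findFrom s ['#'] (k : Int)).toNat ∧
    (PySem.Chars.findFrom s ['#'] (k : Int)).toNat < s.length := by
  obtain ⟨h1, h2, _⟩ := PySem.Chars.findFrom_natCast_spec s ['#'] k hk h
  constructor
  · omega
  · by_contra hge
    rw [List.drop_eq_nil_of_le (by omega)] at h2
    exact (List.cons_ne_nil _ _) (List.prefix_nil.mp h2)

-- fuel-free reference for PySem.Chars.splitOn on separator ['#']
def pvSplit (pre : List Char) : List Char → List (List Char)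
  | [] => [pre]
  | c :: rest => if c = '#' then pre :: pvSplit [] rest else pvSplit (pre ++ [c]) rest

theorem pvGo_spec (l : List Char) : ∀ (fuel : Nat) (cur : List Char) (acc : List (List Char)),
    l.length < fuel →
    PySem.Chars.splitOn.go ['#'] fuel l cur acc = acc.reverse ++ pvSplit cur.reverse l := by
  induction l with
  | nil =>
    intro fuel cur acc hf
    match fuel, hf with
    | fuel + 1, _ =>
      simp [PySem.Chars.splitOn.go, pvSplit]
  | cons c rest ih =>
    intro fuel cur acc hf
    match fuel, hf with
    | fuel + 1, hf =>
      simp only [PySem.Chars.splitOn.go]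
      by_cases hc : c = '#'
      · have hpre : List.isPrefixOf ['#'] (c :: rest) = true := by
          simp [hc, List.isPrefixOf]
        rw [if_pos hpre]
        simp only [List.length_cons, List.length_nil, List.drop_succ_cons, List.drop_zero]
        rw [ih fuel [] (cur.reverse :: acc) (by simpa using hf)]
        simp [pvSplit, hc]
      · have hpre : List.isPrefixOf ['#'] (c :: rest) = false := by
          simp [List.isPrefixOf]
          exact fun h => hc h.symm
        rw [if_neg (by simp [hpre]), ih fuel (c :: cur) acc (by simpa using hf)]
        simp [pvSplit, hc]

theorem pvSplitOn_eq (l : List Char) :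
    PySem.Chars.splitOn l ['#'] = pvSplit [] l := by
  unfold PySem.Chars.splitOn
  rw [pvGo_spec l (l.length + 1) [] [] (by omega)]
  simp

theorem pvSplit_no_hash (pre : List Char) (l : List Char) (h : '#' ∉ l) :
    pvSplit pre l = [pre ++ l] := by
  induction l generalizing pre with
  | nil => simp [pvSplit]
  | cons c rest ih =>
    have hc : c ≠ '#' := by intro he; exact h (by simp [he])
    simp only [pvSplit, if_neg hc]
    rw [ih _ (fun hm => h (by simp [hm]))]
    simp

theorem pvSplit_hash (pre a b : List Char) (h : '#' ∉ a) :
    pvSplit pre (a ++ '#' :: b) = (pre ++ a) :: pvSplit [] b := by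
  induction a generalizing pre with
  | nil => simp [pvSplit]
  | cons c rest ih =>
    have hc : c ≠ '#' := by intro he; exact h (by simp [he])
    simp only [List.cons_append, pvSplit, if_neg hc]
    rw [ih _ (fun hm => h (by simp [hm]))]
    simp

-- a '#' sitting as a prefix of s.drop k splits the drop
theorem pvDrop_succ (s : List Char) (k : Nat) (h : ['#'] <+: s.drop k) :
    s.drop k = '#' :: s.drop (k + 1) := by
  obtain ⟨t, ht⟩ := h
  have htail : (s.drop k).drop 1 = s.drop (k + 1) := by
    rw [List.drop_drop]
  rw [← ht] at htail ⊢
  simp at htail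
  simp [htail]

-- find('#', k) returns k itself when a '#' stands at position k
theorem pvFindFrom_self (s : List Char) (k : Nat) (hk : k ≤ s.length)
    (h : ['#'] <+: s.drop k) : PySem.Chars.findFrom s ['#'] (k : Int) = (k : Int) := by
  rw [PySem.Chars.findFrom_natCast s ['#'] k hk]
  have hinf : ['#'] <:+: s.drop k := h.isInfix
  have hnn : 0 ≤ PySem.Chars.find (s.drop k) ['#'] :=
    (PySem.Chars.find_nonneg_iff _ _).mpr hinf
  have hne : PySem.Chars.find (s.drop k) ['#'] ≠ -1 := by omega
  rw [if_neg hne]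
  obtain ⟨_, hmin⟩ := PySem.Chars.find_spec hnn
  have hz : (PySem.Chars.find (s.drop k) ['#']).toNat = 0 := by
    by_contra h0
    exact hmin 0 (by omega) (by simpa using h)
  omega

-- the abstract value of the loop's remaining work, driven by the suffix after a '#'
def pvTailSegs (t : List Char) : List String :=
  (PySem.Chars.splitOn t ['#']).map (fun p => String.ofList ('#' :: p))

-- master invariant of A's loop (fuel larger than the remaining work never runs out)
theorem pvLoopA_eq (s : List Char) : ∀ (fuel start : Nat), start ≤ s.length → s.length - start < fuel →
    ∀ (acc : List String),
    pvLoopA s fuel start acc =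
      acc ++ (if _hh : PySem.Chars.findFrom s ['#'] (start : Int) = -1 then []
              else pvTailSegs (s.drop ((PySem.Chars.findFrom s ['#'] (start : Int)).toNat + 1))) := by
  intro fuel
  induction fuel with
  | zero => intro start _ hm; omega
  | succ m ih =>
    intro start hs hm acc
    rw [pvLoopA]
    by_cases hh : PySem.Chars.findFrom s ['#'] (start : Int) = -1
    · simp [hh]
    · rw [if_neg hh, dif_neg hh]
      obtain ⟨hk1, hk2⟩ := pvFindFacts s start hs hh
      have hspec := PySem.Chars.findFrom_natCast_spec s ['#'] start hs hh
      have hIpos : 0 ≤ PySem.Chars.findFrom s ['#'] (start : Int) := by have := hspec.1; omega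
      have hcast : PySem.Chars.findFrom s ['#'] (start : Int) + 1 =
          (((PySem.Chars.findFrom s ['#'] (start : Int)).toNat + 1 : Nat) : Int) := by omega
      set hI := PySem.Chars.findFrom s ['#'] (start : Int) with hIdef
      have hpre : ['#'] <+: s.drop hI.toNat := hspec.2.1
      have hdropI : s.drop hI.toNat = '#' :: s.drop (hI.toNat + 1) := pvDrop_succ s _ hpre
      rw [hcast]
      by_cases hn : PySem.Chars.findFrom s ['#'] ((hI.toNat + 1 : Nat) : Int) = -1
      · -- no further '#': last segment is s[hI:]
        rw [if_pos hn]
        have hnohash : '#' ∉ s.drop (hI.toNat + 1) := by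
          have := (PySem.Chars.findFrom_natCast_eq_neg_one_iff s ['#'] (hI.toNat + 1) (by omega)).mp hn
          intro hm'
          exact this ((List.singleton_infix_iff '#' _).mpr hm')
        have hslice : PySem.Chars.slice s (some hI) none = s.drop hI.toNat := by
          simp [PySem.Chars.slice_eq_listSlice, PySem.List.slice_from s hIpos]
        rw [hslice, hdropI]
        unfold pvTailSegs
        rw [pvSplitOn_eq, pvSplit_no_hash [] _ hnohash]
        simp
      · -- another '#' at nI: emit s[hI:nI], continue there
        rw [if_neg hn]
        obtain ⟨hn1, hn2⟩ := pvFindFacts s (hI.toNat + 1) (by omega) hn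
        have hnspec := PySem.Chars.findFrom_natCast_spec s ['#'] (hI.toNat + 1) (by omega) hn
        set nI := PySem.Chars.findFrom s ['#'] ((hI.toNat + 1 : Nat) : Int) with nIdef
        have hnpos : 0 ≤ nI := by have := hnspec.1; omega
        have hnpre : ['#'] <+: s.drop nI.toNat := hnspec.2.1
        rw [ih nI.toNat (by omega) (by omega)]
        rw [pvFindFrom_self s nI.toNat (by omega) hnpre]
        have hnself : ((nI.toNat : Nat) : Int) ≠ -1 := by omega
        simp only [Int.toNat_natCast, hnself, dif_neg, not_false_iff]
        -- compute the emitted slice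
        have hslice : PySem.Chars.slice s (some hI) (some nI) =
            '#' :: (s.drop (hI.toNat + 1)).take (nI.toNat - hI.toNat - 1) := by
          simp only [PySem.Chars.slice_eq_listSlice]
          rw [PySem.List.slice_toNat s hIpos hnpos, hdropI]
          have : nI.toNat - hI.toNat = (nI.toNat - hI.toNat - 1) + 1 := by omega
          rw [this, List.take_succ_cons]
          simp
        rw [hslice]
        -- decompose s.drop (hI.toNat+1) around the '#' at nI
        have hbd : s.drop (hI.toNat + 1) =
            (s.drop (hI.toNat + 1)).take (nI.toNat - hI.toNat - 1) ++ '#' :: s.drop (nI.toNat + 1) := by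
          have hb2 : (s.drop (hI.toNat + 1)).drop (nI.toNat - hI.toNat - 1) = s.drop nI.toNat := by
            rw [List.drop_drop]
            congr 1
            omega
          calc s.drop (hI.toNat + 1)
              = (s.drop (hI.toNat + 1)).take (nI.toNat - hI.toNat - 1) ++
                  (s.drop (hI.toNat + 1)).drop (nI.toNat - hI.toNat - 1) :=
                (List.take_append_drop _ _).symm
            _ = (s.drop (hI.toNat + 1)).take (nI.toNat - hI.toNat - 1) ++ '#' :: s.drop (nI.toNat + 1) := by
                rw [hb2, pvDrop_succ s nI.toNat hnpre]
        have hnoa : '#' ∉ (s.drop (hI.toNat + 1)).take (nI.toNat - hI.toNat - 1) := by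
          intro hmem
          obtain ⟨j, hj, hjv⟩ := List.getElem_of_mem hmem
          have hja : ((s.drop (hI.toNat + 1)).take (nI.toNat - hI.toNat - 1)).length ≤ nI.toNat - hI.toNat - 1 :=
            List.length_take_le _ _
          have hpj : ['#'] <+: s.drop (hI.toNat + 1 + j) := by
            rw [← List.drop_drop]
            have hjb : j < (s.drop (hI.toNat + 1)).length := by
              have := List.length_take_le' (nI.toNat - hI.toNat - 1) (s.drop (hI.toNat + 1))
              omega
            rw [List.drop_eq_getElem_cons hjb]
            have hjc : (s.drop (hI.toNat + 1))[j] = '#' := by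
              rw [← hjv]; exact (List.getElem_take).symm
            rw [hjc]
            exact ⟨_, rfl⟩
          exact hnspec.2.2 (hI.toNat + 1 + j) (by omega) (by omega) hpj
        have hfinal : pvTailSegs (s.drop (hI.toNat + 1)) =
            String.ofList ('#' :: (s.drop (hI.toNat + 1)).take (nI.toNat - hI.toNat - 1)) ::
              pvTailSegs (s.drop (nI.toNat + 1)) := by
          unfold pvTailSegs
          conv_lhs => rw [hbd]
          rw [pvSplitOn_eq, pvSplit_hash [] _ _ hnoa, ← pvSplitOn_eq]
          simp
        rw [hfinal]
        simp

-- top level: relate the loop's value on the whole stripped string to B's split-and-map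
theorem pvMain (cs : List Char) :
    pvLoopA cs (cs.length + 1) 0 [] =
      ((PySem.Chars.splitOn cs ['#']).drop 1).map (fun p => String.ofList ('#' :: p)) := by
  rw [pvLoopA_eq cs (cs.length + 1) 0 (Nat.zero_le _) (by omega) []]
  by_cases hh : PySem.Chars.findFrom cs ['#'] ((0 : Nat) : Int) = -1
  · -- no '#': both sides empty
    have hnohash : '#' ∉ cs := by
      have := (PySem.Chars.findFrom_natCast_eq_neg_one_iff cs ['#'] 0 (Nat.zero_le _)).mp hh
      intro hm
      exact this (by simpa using (List.singleton_infix_iff '#' cs).mpr hm)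
    simp only [Nat.cast_zero] at hh
    rw [pvSplitOn_eq, pvSplit_no_hash [] cs hnohash]
    simp [hh]
  · -- first '#' at h: A yields the tail segments; B drops the pre-'#' part
    obtain ⟨_, hk2⟩ := pvFindFacts cs 0 (Nat.zero_le _) hh
    have hspec := PySem.Chars.findFrom_natCast_spec cs ['#'] 0 (Nat.zero_le _) hh
    set hI := PySem.Chars.findFrom cs ['#'] ((0 : Nat) : Int) with hIdef
    have hpre : ['#'] <+: cs.drop hI.toNat := hspec.2.1
    have hd : cs = cs.take hI.toNat ++ '#' :: cs.drop (hI.toNat + 1) := by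
      conv_lhs => rw [← List.take_append_drop hI.toNat cs]
      rw [pvDrop_succ cs hI.toNat hpre]
    have hnoa : '#' ∉ cs.take hI.toNat := by
      intro hmem
      obtain ⟨j, hj, hjv⟩ := List.getElem_of_mem hmem
      have hja : (cs.take hI.toNat).length ≤ hI.toNat := List.length_take_le _ _
      have hjcs : j < cs.length := by
        have := List.length_take_le' hI.toNat cs
        omega
      have hpj : ['#'] <+: cs.drop j := by
        have : cs.drop j = cs[j] :: cs.drop (j + 1) := List.drop_eq_getElem_cons hjcs
        rw [this]
        have hje : cs[j] = '#' := by
          have : (cs.take hI.toNat)[j] = cs[j] := by simp [List.getElem_take]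
          rw [← this, hjv]
        rw [hje]
        exact ⟨_, rfl⟩
      exact hspec.2.2 j (Nat.zero_le _) (by omega) hpj
    rw [dif_neg hh]
    conv_rhs => rw [hd]
    rw [pvSplitOn_eq, pvSplit_hash [] _ _ hnoa, ← pvSplitOn_eq]
    simp [pvTailSegs]

-- ===== VERDICT (by name: the statement is the Claim_ definition above) =====
theorem split_by_hash_spec : Claim_equal_split_by_hash := by
  intro content _
  unfold Spec_split_by_hash split_by_hash split_by_hash_alt
  match content with
  | none => rfl
  | some c =>
    simp only
    by_cases hcs : PySem.Chars.strip c.toList = []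
    · simp [hcs]
    · simp only [hcs, ite_false]
      exact pvMain _
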